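-- pv_equiv track=rewrite | github.com/cirosantilli/project-euler-solvers | solvers/78.py | least_n_partition_divisible
-- ===== SOURCE A (Python) =====
-- from typing import List
--
-- def least_n_partition_divisible(mod: int) -> int:
--     """
--     Returns the least n such that p(n) % mod == 0.
--     Computes p(n) modulo mod via pentagonal recurrence.
--     """
--     p: List[int] = [1]  # p[0] = 1 (mod mod)
--     n = 1
--     while True:
--         total = 0
--         k = 1
--         while True:
--             g1 = k * (3 * k - 1) // 2
--             if g1 > n:
--                 break
--             sign = 1 if (k % 2 == 1) else -1
--             total += sign * p[n - g1]
--
--             g2 = k * (3 * k + 1) // 2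
--             if g2 <= n:
--                 total += sign * p[n - g2]
--             k += 1
--
--         total %= mod
--         p.append(total)
--         if total == 0:
--             return n
--         n += 1
-- ===== SOURCE B (Python) =====
-- def least_n_partition_divisible(mod: int) -> int:
--     """
--     Returns the least n such that p(n) % mod == 0.
--
--     Grow-and-scan: fill a table of partition numbers mod `mod` up to a
--     bound using a precomputed list of signed generalized pentagonal
--     numbers, scan it for the first zero, and double the bound until one
--     is found.
--     """
--     limit = 16
--     while True:
--         # signed generalized pentagonal numbers (g, sign) with g <= limit
--         pents = []
--         k = 1
--         while k * (3 * k - 1) // 2 <= limit: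
--             s = -1 if k % 2 == 0 else 1
--             pents.append((k * (3 * k - 1) // 2, s))
--             if k * (3 * k + 1) // 2 <= limit:
--                 pents.append((k * (3 * k + 1) // 2, s))
--             k += 1
--         dp = [1]
--         for n in range(1, limit + 1):
--             dp.append(sum(s * dp[n - g] for (g, s) in pents if g <= n) % mod)
--         for n in range(1, limit + 1):
--             if dp[n] == 0:
--                 return n
--         limit *= 2
-- ===== Notes on version B (the rewrite author's own statement) =====
-- stated objective: alternative
-- what changed: A searches incrementally, appending p(n) mod m computed by an on-the-fly nested pentagonal k-loop and returning as soon as an entry is 0; B instead precomputes the signed generalized pentagonal numbers once per bound, fills a whole table up to that bound with a filtered sum over the precomputed list, scans the finished table for the first zero, and doubles the bound if none is found.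
-- outside the precondition, e.g. on least_n_partition_divisible(0): A raises ZeroDivisionError, B raises ZeroDivisionError
import Mathlib
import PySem

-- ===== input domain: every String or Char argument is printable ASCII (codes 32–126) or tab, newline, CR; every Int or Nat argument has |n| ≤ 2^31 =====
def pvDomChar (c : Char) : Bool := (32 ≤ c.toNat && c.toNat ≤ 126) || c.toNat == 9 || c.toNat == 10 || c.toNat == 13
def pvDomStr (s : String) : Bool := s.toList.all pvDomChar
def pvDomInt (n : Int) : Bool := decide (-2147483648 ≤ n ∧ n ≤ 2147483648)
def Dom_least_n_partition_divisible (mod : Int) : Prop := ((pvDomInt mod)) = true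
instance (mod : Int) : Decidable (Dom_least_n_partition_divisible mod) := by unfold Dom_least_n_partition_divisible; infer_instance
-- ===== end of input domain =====

-- B replaces A's incremental search (nested on-the-fly pentagonal k-loop, return on first zero)
-- by: precompute the signed generalized pentagonal numbers up to a bound, fill a whole table,
-- scan it for the first zero, doubling the bound if none is found (objective: alternative).
-- Both Pythons loop forever if no n with p(n) % mod == 0 existed; the ports carry a fuel
-- parameter (2^59 table entries on both sides, aligned) that only makes them total.

-- ===== PORT A =====
-- inner 'while True' over k; fuel n+1 suffices because g1 ≥ k, so the break fires by k = n+1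
def pvA_inner (p : List Int) (n : Int) (total k : Int) : Nat → Int
  | 0 => total
  | fuel+1 =>
    if PySem.Int.floordiv (k * (3 * k - 1)) 2 > n then total
    else
      let sign : Int := if PySem.Int.mod k 2 = 1 then 1 else -1
      let t1 := total + sign * PySem.List.pyGetD p (n - PySem.Int.floordiv (k * (3 * k - 1)) 2) 0
      let t2 := if PySem.Int.floordiv (k * (3 * k + 1)) 2 ≤ n then
                  t1 + sign * PySem.List.pyGetD p (n - PySem.Int.floordiv (k * (3 * k + 1)) 2) 0
                else t1
      pvA_inner p n t2 (k + 1) fuel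

-- outer 'while True' over n, with fuel (0 on exhaustion, unreachable for Python-terminating inputs)
def pvA_outer (m : Int) (p : List Int) (n : Int) : Nat → Int
  | 0 => 0
  | fuel+1 =>
    let total := PySem.Int.mod (pvA_inner p n 0 1 (n.toNat + 1)) m
    if total = 0 then n else pvA_outer m (p ++ [total]) (n + 1) fuel

def least_n_partition_divisible (mod : Int) : Int :=
  pvA_outer mod [1] 1 576460752303423488

-- ===== PORT B =====
-- 'while k*(3*k-1)//2 <= limit' building the pentagonal list; fuel limit+1 suffices (g1 ≥ k)
def pvB_pents (limit k : Int) : Nat → List (Int × Int)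
  | 0 => []
  | fuel+1 =>
    if PySem.Int.floordiv (k * (3 * k - 1)) 2 ≤ limit then
      let s : Int := if PySem.Int.mod k 2 = 0 then -1 else 1
      ((PySem.Int.floordiv (k * (3 * k - 1)) 2, s) ::
        (if PySem.Int.floordiv (k * (3 * k + 1)) 2 ≤ limit then
           [(PySem.Int.floordiv (k * (3 * k + 1)) 2, s)]
         else [])) ++ pvB_pents limit (k + 1) fuel
    else []

-- dp.append(sum(s * dp[n - g] for (g, s) in pents if g <= n) % mod)
def pvB_row (m : Int) (pents : List (Int × Int)) (dp : List Int) (n : Int) : Int :=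
  PySem.Int.mod
    (pents.foldl (fun acc gs =>
      if gs.1 ≤ n then acc + gs.2 * PySem.List.pyGetD dp (n - gs.1) 0 else acc) 0) m

def pvB_build (m limit : Int) : List Int :=
  (PySem.List.pyRange 1 (limit + 1) 1).foldl
    (fun dp n => dp ++ [pvB_row m (pvB_pents limit 1 (limit.toNat + 1)) dp n]) [1]

-- 'for n in range(1, limit + 1): if dp[n] == 0: return n'
def pvB_scanLoop (dp : List Int) : List Int → Option Int
  | [] => none
  | n :: rest => if PySem.List.pyGetD dp n 0 = 0 then some n else pvB_scanLoop dp rest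

-- outer 'while True' doubling limit, with fuel (0 on exhaustion; 56 doublings from 16 = 2^59 entries)
def pvB_search (m limit : Int) : Nat → Int
  | 0 => 0
  | fuel+1 =>
    let dp := pvB_build m limit
    match pvB_scanLoop dp (PySem.List.pyRange 1 (limit + 1) 1) with
    | some n => n
    | none => pvB_search m (2 * limit) fuel

def least_n_partition_divisible_alt (mod : Int) : Int :=
  pvB_search mod 16 56

-- ===== PRECONDITION & SPEC =====
-- Pre_ excludes only mod = 0, on which Python A raises ZeroDivisionError ('total %= mod').
def Pre_least_n_partition_divisible (mod : Int) : Prop := mod ≠ 0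
instance (mod : Int) : Decidable (Pre_least_n_partition_divisible mod) := by
  unfold Pre_least_n_partition_divisible; infer_instance
def pvWitness_least_n_partition_divisible : Int := 2

def Spec_least_n_partition_divisible (mod : Int) (out : Int) : Prop := out = least_n_partition_divisible_alt mod
instance (mod : Int) (out : Int) : Decidable (Spec_least_n_partition_divisible mod out) := by unfold Spec_least_n_partition_divisible; infer_instance

-- ===== CLAIM (what is proved, stated in full; the proofs are below) =====
def Claim_equal_least_n_partition_divisible : Prop := ∀ (mod : Int), Dom_least_n_partition_divisible mod → Pre_least_n_partition_divisible mod → Spec_least_n_partition_divisible mod (least_n_partition_divisible mod)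

-- ===== LEMMAS AND PROOFS =====

-- the reference table: ptab m n = [p(0), …, p(n)] reduced mod m, entries as A computes them
def ptab (m : Int) : Nat → List Int
  | 0 => [1]
  | n+1 => ptab m n ++ [PySem.Int.mod (pvA_inner (ptab m n) ((n : Int) + 1) 0 1 (n + 2)) m]

-- entry n (n ≥ 1) of the reference table
def pvE (m : Int) (n : Nat) : Int :=
  PySem.Int.mod (pvA_inner (ptab m (n - 1)) (n : Int) 0 1 (n + 1)) m

-- first index ≥ n with a zero entry, checked for 'fuel' indices; 0 if none
def pvFZ (m : Int) (n : Nat) : Nat → Int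
  | 0 => 0
  | fuel+1 => if pvE m n = 0 then (n : Int) else pvFZ m (n + 1) fuel

lemma fd2 (x : Int) : PySem.Int.floordiv (2 * x) 2 = x := by
  rw [PySem.Int.floordiv_eq_iff_of_pos (by norm_num)]; omega

lemma two_mul_pent1 (k : Int) :
    2 * PySem.Int.floordiv (k * (3 * k - 1)) 2 = k * (3 * k - 1) := by
  obtain ⟨x, hx⟩ : ∃ x, k * (3 * k - 1) = 2 * x := by
    rcases Int.even_or_odd k with ⟨a, ha⟩ | ⟨a, ha⟩
    · exact ⟨a * (6 * a - 1), by subst ha; ring⟩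
    · exact ⟨(2 * a + 1) * (3 * a + 1), by subst ha; ring⟩
  rw [hx, fd2]

lemma two_mul_pent2 (k : Int) :
    2 * PySem.Int.floordiv (k * (3 * k + 1)) 2 = k * (3 * k + 1) := by
  obtain ⟨x, hx⟩ : ∃ x, k * (3 * k + 1) = 2 * x := by
    rcases Int.even_or_odd k with ⟨a, ha⟩ | ⟨a, ha⟩
    · exact ⟨a * (6 * a + 1), by subst ha; ring⟩
    · exact ⟨(2 * a + 1) * (3 * a + 2), by subst ha; ring⟩
  rw [hx, fd2]

lemma pent1_ge (k : Int) (hk : 1 ≤ k) : k ≤ PySem.Int.floordiv (k * (3 * k - 1)) 2 := by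
  nlinarith [two_mul_pent1 k, mul_nonneg (by linarith : (0:ℤ) ≤ k) (by linarith : (0:ℤ) ≤ k - 1)]

lemma pent2_ge_pent1 (k : Int) (hk : 1 ≤ k) :
    PySem.Int.floordiv (k * (3 * k - 1)) 2 ≤ PySem.Int.floordiv (k * (3 * k + 1)) 2 := by
  nlinarith [two_mul_pent1 k, two_mul_pent2 k]

lemma pent1_mono (k : Int) (hk : 1 ≤ k) :
    PySem.Int.floordiv (k * (3 * k - 1)) 2 ≤
      PySem.Int.floordiv ((k + 1) * (3 * (k + 1) - 1)) 2 := by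
  nlinarith [two_mul_pent1 k, two_mul_pent1 (k + 1)]

-- every pentagonal number listed from k on is at least g1(k)
lemma pents_ge : ∀ (fp : Nat) (limit k : Int), 1 ≤ k →
    ∀ gs ∈ pvB_pents limit k fp, PySem.Int.floordiv (k * (3 * k - 1)) 2 ≤ gs.1 := by
  intro fp
  induction fp with
  | zero => intro limit k hk gs hgs; simp [pvB_pents] at hgs
  | succ fp ih =>
    intro limit k hk gs hgs
    simp only [pvB_pents] at hgs
    split at hgs
    · rcases List.mem_cons.1 hgs with h | h
      · subst h; simp
      · rcases List.mem_append.1 h with h' | h'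
        · split at h'
          · rcases List.mem_singleton.1 h'
            exact pent2_ge_pent1 k hk
          · simp at h'
        · have h1 := ih limit (k + 1) (by omega) gs h'
          exact le_trans (pent1_mono k hk) h1
    · simp at hgs

lemma foldl_skip (n : Int) (p : List Int) :
    ∀ (l : List (Int × Int)) (acc : Int), (∀ gs ∈ l, n < gs.1) →
    l.foldl (fun acc gs =>
      if gs.1 ≤ n then acc + gs.2 * PySem.List.pyGetD p (n - gs.1) 0 else acc) acc = acc := by
  intro l
  induction l with
  | nil => intro acc _; rfl
  | cons a t ih =>
    intro acc h
    have ha : n < a.1 := h a (List.mem_cons_self ..)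
    simp only [List.foldl_cons, if_neg (not_le.2 ha)]
    exact ih acc (fun gs hgs => h gs (List.mem_cons_of_mem _ hgs))

lemma inner_eq : ∀ (fa fp : Nat) (k acc : Int) (p : List Int) (n limit : Int),
    1 ≤ k → n ≤ limit → n < k + (fa : Int) → limit < k + (fp : Int) →
    (pvB_pents limit k fp).foldl (fun acc gs =>
      if gs.1 ≤ n then acc + gs.2 * PySem.List.pyGetD p (n - gs.1) 0 else acc) acc
      = pvA_inner p n acc k fa := by
  intro fa
  induction fa with
  | zero =>
    intro fp k acc p n limit hk hnl hfa hfp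
    simp only [pvA_inner]
    refine foldl_skip n p _ acc (fun gs hgs => ?_)
    have h1 := pents_ge fp limit k hk gs hgs
    have h2 := pent1_ge k hk
    push_cast at hfa
    omega
  | succ fa ih =>
    intro fp k acc p n limit hk hnl hfa hfp
    by_cases hg1 : PySem.Int.floordiv (k * (3 * k - 1)) 2 > n
    · simp only [pvA_inner, if_pos hg1]
      refine foldl_skip n p _ acc (fun gs hgs => ?_)
      have h1 := pents_ge fp limit k hk gs hgs
      omega
    · rw [not_lt] at hg1
      have hg1l : PySem.Int.floordiv (k * (3 * k - 1)) 2 ≤ limit := le_trans hg1 hnl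
      have hfp0 : fp ≠ 0 := by
        intro h; subst h
        have := pent1_ge k hk
        push_cast at hfp
        omega
      obtain ⟨fp', rfl⟩ := Nat.exists_eq_succ_of_ne_zero hfp0
      have hsign : (if PySem.Int.mod k 2 = 0 then (-1 : Int) else 1)
          = (if PySem.Int.mod k 2 = 1 then (1 : Int) else -1) := by
        rcases PySem.Int.mod_two_eq k with h | h <;> rw [h] <;> decide
      simp only [pvB_pents, if_pos hg1l, pvA_inner, if_neg (not_lt.2 hg1)]
      rw [hsign]
      simp only [List.cons_append, List.foldl_cons, if_pos hg1]
      by_cases hg2 : PySem.Int.floordiv (k * (3 * k + 1)) 2 ≤ n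
      case pos =>
        have hg2l : PySem.Int.floordiv (k * (3 * k + 1)) 2 ≤ limit := le_trans hg2 hnl
        simp only [if_pos hg2l, List.singleton_append, List.foldl_cons, if_pos hg2]
        refine ih fp' (k + 1) _ p n limit (by omega) hnl ?_ ?_ <;> push_cast at hfa hfp ⊢ <;> omega
      case neg =>
        have hA : (if PySem.Int.floordiv (k * (3 * k + 1)) 2 ≤ n then
            acc + (if PySem.Int.mod k 2 = 1 then (1:Int) else -1) *
              PySem.List.pyGetD p (n - PySem.Int.floordiv (k * (3 * k - 1)) 2) 0 +
              (if PySem.Int.mod k 2 = 1 then (1:Int) else -1) *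
                PySem.List.pyGetD p (n - PySem.Int.floordiv (k * (3 * k + 1)) 2) 0
          else acc + (if PySem.Int.mod k 2 = 1 then (1:Int) else -1) *
              PySem.List.pyGetD p (n - PySem.Int.floordiv (k * (3 * k - 1)) 2) 0)
            = acc + (if PySem.Int.mod k 2 = 1 then (1:Int) else -1) *
              PySem.List.pyGetD p (n - PySem.Int.floordiv (k * (3 * k - 1)) 2) 0 :=
          if_neg hg2
        rw [hA]
        by_cases hg2l : PySem.Int.floordiv (k * (3 * k + 1)) 2 ≤ limit
        · simp only [if_pos hg2l, List.singleton_append, List.foldl_cons, if_neg hg2]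
          refine ih fp' (k + 1) _ p n limit (by omega) hnl ?_ ?_ <;> push_cast at hfa hfp ⊢ <;> omega
        · simp only [if_neg hg2l, List.nil_append]
          refine ih fp' (k + 1) _ p n limit (by omega) hnl ?_ ?_ <;> push_cast at hfa hfp ⊢ <;> omega

lemma row_eq (m limit : Int) (p : List Int) (mm : Nat) (hml : ((mm : Int) + 1) ≤ limit) :
    pvB_row m (pvB_pents limit 1 (limit.toNat + 1)) p ((mm : Int) + 1)
      = PySem.Int.mod (pvA_inner p ((mm : Int) + 1) 0 1 (mm + 2)) m := by
  unfold pvB_row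
  congr 1
  refine inner_eq (mm + 2) (limit.toNat + 1) 1 0 p ((mm : Int) + 1) limit le_rfl hml ?_ ?_ <;>
    push_cast <;> omega

lemma build_aux (m limit : Int) : ∀ (mm : Nat), (mm : Int) ≤ limit →
    (PySem.List.pyRange 1 ((mm : Int) + 1) 1).foldl
      (fun dp n => dp ++ [pvB_row m (pvB_pents limit 1 (limit.toNat + 1)) dp n]) [1]
      = ptab m mm := by
  intro mm
  induction mm with
  | zero =>
    intro _
    rw [show ((0 : Nat) : Int) + 1 = 1 by norm_num, PySem.List.pyRange_one_eq_nil le_rfl]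
    rfl
  | succ mm ih =>
    intro hle
    have hcast : ((mm + 1 : Nat) : Int) = (mm : Int) + 1 := by push_cast; ring
    rw [hcast, PySem.List.pyRange_one_succ_right (by omega), List.foldl_append,
      ih (by push_cast at hle ⊢; omega), List.foldl_cons, List.foldl_nil]
    rw [row_eq m limit (ptab m mm) mm (by rw [← hcast]; exact hle)]
    rfl

lemma build_eq (m limit : Int) (hl : 1 ≤ limit) :
    pvB_build m limit = ptab m limit.toNat := by
  unfold pvB_build
  have h : ((limit.toNat : Int)) = limit := Int.toNat_of_nonneg (by omega)
  have h2 := build_aux m limit limit.toNat (by omega)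
  rw [h] at h2
  exact h2

lemma ptab_len (m : Int) : ∀ (j : Nat), (ptab m j).length = j + 1 := by
  intro j
  induction j with
  | zero => rfl
  | succ j ih => simp [ptab, ih]

lemma ptab_getD (m : Int) : ∀ (j n : Nat), n ≤ j →
    (ptab m j).getD n 0 = if n = 0 then 1 else pvE m n := by
  intro j
  induction j with
  | zero =>
    intro n hn
    interval_cases n
    rfl
  | succ j ih =>
    intro n hn
    rcases Nat.lt_or_ge n (j + 1) with h | h
    · rw [ptab, List.getD_append (ptab m j) _ 0 n (by rw [ptab_len]; omega)]
      exact ih n (by omega)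
    · have hn' : n = j + 1 := by omega
      subst hn'
      rw [ptab, List.getD_append_right (ptab m j) _ 0 (j + 1) (by rw [ptab_len])]
      rw [ptab_len, Nat.sub_self]
      have : pvE m (j + 1) = PySem.Int.mod (pvA_inner (ptab m j) ((j : Int) + 1) 0 1 (j + 2)) m := by
        unfold pvE
        norm_num
      rw [if_neg (by omega)]
      rw [this]
      rfl

lemma outer_eq (m : Int) : ∀ (fuel : Nat) (n : Nat), 1 ≤ n →
    pvA_outer m (ptab m (n - 1)) (n : Int) fuel = pvFZ m n fuel := by
  intro fuel
  induction fuel with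
  | zero => intro n _; rfl
  | succ fuel ih =>
    intro n hn
    obtain ⟨n', rfl⟩ : ∃ n', n = n' + 1 := ⟨n - 1, by omega⟩
    have hE : PySem.Int.mod (pvA_inner (ptab m (n' + 1 - 1)) ((n' + 1 : Nat) : Int) 0 1
        (((n' + 1 : Nat) : Int).toNat + 1)) m = pvE m (n' + 1) := by
      unfold pvE
      norm_num
    simp only [pvA_outer, pvFZ, hE]
    by_cases hz : pvE m (n' + 1) = 0
    · rw [if_pos hz, if_pos hz]
    · rw [if_neg hz, if_neg hz]
      have hstep : ptab m (n' + 1 - 1) ++ [pvE m (n' + 1)] = ptab m (n' + 2 - 1) := by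
        unfold pvE
        simp only [Nat.add_sub_cancel]
        show _ = ptab m (n' + 1)
        rw [ptab]
        norm_num
      rw [hstep]
      have := ih (n' + 2) (by omega)
      rw [show (((n' + 2 : Nat)) : Int) = ((n' + 1 : Nat) : Int) + 1 by push_cast; ring] at this
      exact this

lemma fz_mono (m : Int) : ∀ (c c' : Nat) (n : Nat), c ≤ c' → pvFZ m n c ≠ 0 →
    pvFZ m n c' = pvFZ m n c := by
  intro c
  induction c with
  | zero => intro c' n _ hne; exact absurd rfl hne
  | succ c ih =>
    intro c' n hc hne
    obtain ⟨c'', rfl⟩ : ∃ c'', c' = c'' + 1 := ⟨c' - 1, by omega⟩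
    by_cases hz : pvE m n = 0
    · simp only [pvFZ, if_pos hz]
    · simp only [pvFZ, if_neg hz] at hne ⊢
      exact ih c'' (n + 1) (by omega) hne

lemma scan_eq_fz (m limit : Int) (hl : 1 ≤ limit) (dp : List Int)
    (hdp : dp = ptab m limit.toNat) :
    ∀ (cnt : Nat) (n : Nat), 1 ≤ n → (n : Int) + cnt = limit + 1 →
    pvB_scanLoop dp (PySem.List.pyRange (n : Int) (limit + 1) 1)
      = (if pvFZ m n cnt = 0 then none else some (pvFZ m n cnt)) := by
  intro cnt
  induction cnt with
  | zero =>
    intro n hn hcnt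
    rw [PySem.List.pyRange_one_eq_nil (by omega)]
    simp [pvB_scanLoop, pvFZ]
  | succ cnt ih =>
    intro n hn hcnt
    rw [PySem.List.pyRange_one_cons (by push_cast at hcnt ⊢; omega)]
    have hget : PySem.List.pyGetD dp ((n : Nat) : Int) 0 = pvE m n := by
      rw [hdp, PySem.List.pyGetD_natCast]
      rw [ptab_getD m limit.toNat n (by push_cast at hcnt; omega)]
      rw [if_neg (by omega)]
    simp only [pvB_scanLoop, hget, pvFZ]
    by_cases hz : pvE m n = 0
    · rw [if_pos hz, if_pos hz, if_neg (by omega : ¬ ((n : Int) = 0))]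
    · rw [if_neg hz, if_neg hz]
      rw [show (n : Int) + 1 = ((n + 1 : Nat) : Int) by push_cast; ring]
      exact ih (n + 1) (by omega) (by push_cast at hcnt ⊢; omega)

def pvM : Nat → Int → Nat
  | 0, _ => 0
  | d+1, limit => limit.toNat * 2 ^ d

lemma search_eq (m : Int) : ∀ (d : Nat) (limit : Int), 1 ≤ limit →
    pvB_search m limit d = pvFZ m 1 (pvM d limit) := by
  intro d
  induction d with
  | zero => intro limit _; rfl
  | succ d ih =>
    intro limit hl
    have hscan := scan_eq_fz m limit hl (pvB_build m limit) (build_eq m limit hl)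
      limit.toNat 1 le_rfl (by omega)
    rw [show ((1 : Nat) : Int) = 1 by norm_num] at hscan
    simp only [pvB_search, hscan]
    by_cases hz : pvFZ m 1 limit.toNat = 0
    · rw [if_pos hz]
      rw [ih (2 * limit) (by omega)]
      rcases Nat.eq_zero_or_pos d with hd | hd
      · subst hd
        show pvFZ m 1 0 = pvFZ m 1 (limit.toNat * 2 ^ 0)
        rw [pow_zero, Nat.mul_one, hz]
        rfl
      · obtain ⟨d', rfl⟩ : ∃ d', d = d' + 1 := ⟨d - 1, by omega⟩
        show pvFZ m 1 ((2 * limit).toNat * 2 ^ d') = pvFZ m 1 (limit.toNat * 2 ^ (d' + 1))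
        congr 1
        have h2 : (2 * limit).toNat = 2 * limit.toNat := by omega
        rw [h2, pow_succ]
        ring
    · rw [if_neg hz]
      show pvFZ m 1 limit.toNat = pvFZ m 1 (limit.toNat * 2 ^ d)
      rw [fz_mono m limit.toNat (limit.toNat * 2 ^ d) 1
        (Nat.le_mul_of_pos_right _ (by positivity)) hz]

-- ===== VERDICT (by name: the statement is the Claim_ definition above) =====
theorem least_n_partition_divisible_spec : Claim_equal_least_n_partition_divisible := by
  intro m _ _
  unfold Spec_least_n_partition_divisible
  unfold least_n_partition_divisible least_n_partition_divisible_alt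
  have hA := outer_eq m 576460752303423488 1 le_rfl
  have hB := search_eq m 56 16 (by norm_num)
  simp only [ptab] at hA
  rw [show ((1:Nat) : Int) = 1 from rfl] at hA
  rw [hA, hB]
  have h16 : pvM 56 16 = 576460752303423488 := by
    show (16 : Int).toNat * 2 ^ 55 = 576460752303423488
    rfl
  rw [h16]
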